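-- pv_equiv track=rewrite | github.com/Cloufield/gwaspeek | src/gwaspeek/interactive.py | _nearest_gene_for_chr_pos
-- ===== SOURCE A (Python) =====
-- from typing import Dict, List, Tuple
--
-- def _nearest_gene_for_chr_pos(
--     chrom: int,
--     pos: int,
--     genes_by_chr: Dict[int, List[Tuple[int, int, str]]],
-- ) -> str | None:
--     genes = genes_by_chr.get(chrom, [])
--     if not genes:
--         return None
--     best_name: str | None = None
--     best_dist: int | None = None
--     for g_start, g_end, g_name in genes:
--         if g_start <= pos <= g_end:
--             return g_name
--         dist = g_start - pos if pos < g_start else pos - g_end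
--         if best_dist is None or dist < best_dist:
--             best_dist = dist
--             best_name = g_name
--     return best_name
-- ===== SOURCE B (Python) =====
-- def _nearest_gene_for_chr_pos(chrom, pos, genes_by_chr):
--     genes = genes_by_chr.get(chrom, [])
--     if not genes:
--         return None
--
--     def rank(gene):
--         # lexicographic rank: containing genes rank (0, 0), others (1, distance)
--         start, end, name = gene
--         if start <= pos <= end:
--             return (0, 0, name)
--         return (1, start - pos if pos < start else pos - end, name)
--
--     def best(items):
--         # divide and conquer: best-ranked gene of items, leftmost on ties
--         if len(items) == 1:
--             return rank(items[0])
--         mid = len(items) // 2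
--         left = best(items[:mid])
--         right = best(items[mid:])
--         return left if (left[0], left[1]) <= (right[0], right[1]) else right
--
--     return best(genes)[2]
-- ===== Notes on version B (the rewrite author's own statement) =====
-- stated objective: alternative
-- what changed: Replaces A's stateful left-to-right scan with early return by a divide-and-conquer recursion: each gene is ranked to a lexicographic key (contains-flag, distance) and halves are combined with a left-biased minimum, whose associativity makes the split order irrelevant.
import Mathlib
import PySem

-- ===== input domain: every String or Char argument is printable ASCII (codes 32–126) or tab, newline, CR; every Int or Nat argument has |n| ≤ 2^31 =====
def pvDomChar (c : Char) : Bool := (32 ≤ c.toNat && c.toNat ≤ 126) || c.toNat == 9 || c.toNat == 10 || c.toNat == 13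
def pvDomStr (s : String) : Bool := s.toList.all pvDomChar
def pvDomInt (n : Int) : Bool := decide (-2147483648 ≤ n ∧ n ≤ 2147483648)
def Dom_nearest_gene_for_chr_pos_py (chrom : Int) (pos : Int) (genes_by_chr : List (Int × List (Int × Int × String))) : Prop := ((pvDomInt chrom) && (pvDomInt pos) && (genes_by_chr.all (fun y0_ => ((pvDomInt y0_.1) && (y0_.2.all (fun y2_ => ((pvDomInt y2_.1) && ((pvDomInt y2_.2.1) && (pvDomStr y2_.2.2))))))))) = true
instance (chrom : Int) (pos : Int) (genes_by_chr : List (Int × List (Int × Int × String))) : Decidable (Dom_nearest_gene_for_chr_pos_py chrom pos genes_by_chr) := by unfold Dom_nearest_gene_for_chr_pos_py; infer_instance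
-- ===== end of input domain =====

-- B replaces A's stateful left-to-right scan (early return on containment, running best_name/best_dist)
-- by a divide-and-conquer recursion over ranked genes combined with a left-biased lexicographic minimum;
-- same asymptotic cost, genuinely different traversal.

-- ===== PORT A =====
-- A's for-loop with early return on containment and running (best_name, best_dist) state.
def pvLoopA (pos : Int) : List (Int × Int × String) → Option String → Option Int → Option String
  | [], best_name, _ => best_name
  | (g_start, g_end, g_name) :: rest, best_name, best_dist =>
    if g_start ≤ pos ∧ pos ≤ g_end then some g_name
    else
      let dist := if pos < g_start then g_start - pos else pos - g_end
      match best_dist with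
      | none => pvLoopA pos rest (some g_name) (some dist)
      | some b => if dist < b then pvLoopA pos rest (some g_name) (some dist)
                  else pvLoopA pos rest best_name (some b)

def nearest_gene_for_chr_pos_py (chrom : Int) (pos : Int) (genes_by_chr : List (Int × List (Int × Int × String))) : Option String :=
  let genes := (PySem.Dict.mk genes_by_chr).getD chrom []
  if genes = [] then none
  else pvLoopA pos genes none none

-- ===== PORT B =====
-- Source B's rank(gene): (contains-flag, distance-or-0, name)
def pvRank (pos : Int) (g : Int × Int × String) : Int × Int × String :=
  if g.1 ≤ pos ∧ pos ≤ g.2.1 then (0, 0, g.2.2)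
  else (1, if pos < g.1 then g.1 - pos else pos - g.2.1, g.2.2)

-- the 'left if (l0,l1) <= (r0,r1) else right' combiner
def pvCombine (l r : Int × Int × String) : Int × Int × String :=
  if l.1 < r.1 ∨ (l.1 = r.1 ∧ l.2.1 ≤ r.2.1) then l else r

-- Source B's best(items): split at len//2 and combine ([] is unreachable in Source B)
def pvBest (pos : Int) (items : List (Int × Int × String)) : Int × Int × String :=
  match items with
  | [] => (0, 0, "")
  | [g] => pvRank pos g
  | a :: b :: rest =>
    let mid := (a :: b :: rest).length / 2
    pvCombine (pvBest pos ((a :: b :: rest).take mid)) (pvBest pos ((a :: b :: rest).drop mid))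
  termination_by items.length
  decreasing_by
  · simp [List.length_take]; omega
  · simp [List.length_drop]; omega

def nearest_gene_for_chr_pos_py_alt (chrom : Int) (pos : Int) (genes_by_chr : List (Int × List (Int × Int × String))) : Option String :=
  let genes := (PySem.Dict.mk genes_by_chr).getD chrom []
  if genes = [] then none
  else some (pvBest pos genes).2.2

-- ===== PRECONDITION & SPEC =====
def Spec_nearest_gene_for_chr_pos_py (chrom : Int) (pos : Int) (genes_by_chr : List (Int × List (Int × Int × String))) (out : Option String) : Prop := out = nearest_gene_for_chr_pos_py_alt chrom pos genes_by_chr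
instance (chrom : Int) (pos : Int) (genes_by_chr : List (Int × List (Int × Int × String))) (out : Option String) : Decidable (Spec_nearest_gene_for_chr_pos_py chrom pos genes_by_chr out) := by unfold Spec_nearest_gene_for_chr_pos_py; infer_instance

-- ===== CLAIM (what is proved, stated in full; the proofs are below) =====
def Claim_equal_nearest_gene_for_chr_pos_py : Prop := ∀ (chrom : Int) (pos : Int) (genes_by_chr : List (Int × List (Int × Int × String))), Dom_nearest_gene_for_chr_pos_py chrom pos genes_by_chr → Spec_nearest_gene_for_chr_pos_py chrom pos genes_by_chr (nearest_gene_for_chr_pos_py chrom pos genes_by_chr)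

-- ===== LEMMAS AND PROOFS =====

-- left-to-right reference fold: first best-ranked gene
def pvSpecFold (pos : Int) (g : Int × Int × String) (t : List (Int × Int × String)) : Int × Int × String :=
  t.foldl (fun acc x => pvCombine acc (pvRank pos x)) (pvRank pos g)

lemma pvCombine_assoc (a b c : Int × Int × String) :
    pvCombine (pvCombine a b) c = pvCombine a (pvCombine b c) := by
  obtain ⟨a1, a2, a3⟩ := a; obtain ⟨b1, b2, b3⟩ := b; obtain ⟨c1, c2, c3⟩ := c
  unfold pvCombine
  split_ifs <;> first | rfl | (exfalso; omega)

lemma pvFoldl_combine (pos : Int) :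
    ∀ (t : List (Int × Int × String)) (acc g : Int × Int × String),
    List.foldl (fun a x => pvCombine a (pvRank pos x)) acc (g :: t)
      = pvCombine acc (List.foldl (fun a x => pvCombine a (pvRank pos x)) (pvRank pos g) t) := by
  intro t
  induction t with
  | nil => intro acc g; rfl
  | cons y ys ih =>
    intro acc g
    have h1 := ih (pvCombine acc (pvRank pos g)) y
    have h2 := ih (pvRank pos g) y
    simp only [List.foldl_cons] at h1 h2 ⊢
    rw [h1, h2, pvCombine_assoc]

lemma pvSpecFold_append (pos : Int) (g : Int × Int × String) (t : List (Int × Int × String))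
    (h : Int × Int × String) (u : List (Int × Int × String)) :
    pvSpecFold pos g (t ++ h :: u) = pvCombine (pvSpecFold pos g t) (pvSpecFold pos h u) := by
  unfold pvSpecFold
  rw [List.foldl_append]
  exact pvFoldl_combine pos u _ h

-- divide-and-conquer equals the left-to-right fold
lemma pvBest_eq_spec (pos : Int) : ∀ (n : ℕ) (g : Int × Int × String) (t : List (Int × Int × String)),
    (g :: t).length ≤ n → pvBest pos (g :: t) = pvSpecFold pos g t := by
  intro n
  induction n with
  | zero => intro g t h; simp at h
  | succ n ih =>
    intro g t hlen
    match t with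
    | [] => simp [pvBest, pvSpecFold]
    | b :: rest =>
      have hL : (g :: b :: rest).length = rest.length + 2 := by simp
      obtain ⟨m, hm⟩ : ∃ m, (g :: b :: rest).length / 2 = m + 1 :=
        ⟨(g :: b :: rest).length / 2 - 1, by omega⟩
      have hmidlt : (g :: b :: rest).length / 2 < (g :: b :: rest).length := by omega
      have htake : (g :: b :: rest).take ((g :: b :: rest).length / 2)
          = g :: (b :: rest).take m := by rw [hm, List.take_succ_cons]
      have hdrop := List.drop_eq_getElem_cons hmidlt
      set y := (g :: b :: rest)[(g :: b :: rest).length / 2] with hy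
      set dr := (g :: b :: rest).drop ((g :: b :: rest).length / 2 + 1) with hdr
      set tk := (b :: rest).take m with htk
      have happ : (g :: tk) ++ (y :: dr) = g :: b :: rest := by
        have h0 := List.take_append_drop ((g :: b :: rest).length / 2) (g :: b :: rest)
        rw [htake, hdrop] at h0
        exact h0
      have hsum := congrArg List.length happ
      simp only [List.length_append, List.length_cons] at hsum
      have hlen' : rest.length + 1 + 1 ≤ n + 1 := by simpa using hlen
      rw [pvBest, htake, hdrop]
      rw [ih g tk (by simp only [List.length_cons]; omega)]
      rw [ih y dr (by simp only [List.length_cons]; omega)]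
      rw [← pvSpecFold_append pos g tk y dr]
      have htail : tk ++ y :: dr = b :: rest := by simpa using happ
      rw [htail]

-- once the accumulator is a containing rank (flag 0, score 0), the fold never changes it
lemma pvFold_absorb_zero (pos : Int) (n : String) (t : List (Int × Int × String)) :
    t.foldl (fun a x => pvCombine a (pvRank pos x)) (0, 0, n) = (0, 0, n) := by
  induction t with
  | nil => rfl
  | cons y ys ih =>
    simp only [List.foldl_cons]
    have hstep : pvCombine (0, 0, n) (pvRank pos y) = (0, 0, n) := by
      unfold pvRank
      split_ifs <;> (unfold pvCombine; rw [if_pos (by simp)])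
    rw [hstep, ih]

-- A's loop with a flag-1 accumulator equals the combine-fold from that accumulator
lemma pvLoopA_eq_fold (pos : Int) (t : List (Int × Int × String)) :
    ∀ (d : Int) (nm : String),
    pvLoopA pos t (some nm) (some d)
      = some (t.foldl (fun a x => pvCombine a (pvRank pos x)) (1, d, nm)).2.2 := by
  induction t with
  | nil => intro d nm; rfl
  | cons g rest ih =>
    intro d nm
    obtain ⟨gs, ge, gn⟩ := g
    by_cases hc : gs ≤ pos ∧ pos ≤ ge
    · simp only [pvLoopA, if_pos hc, List.foldl_cons]
      have h1 : pvRank pos (gs, ge, gn) = (0, 0, gn) := by simp [pvRank, hc]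
      have h2 : pvCombine (1, d, nm) ((0 : Int), (0 : Int), gn) = (0, 0, gn) := by
        unfold pvCombine; rw [if_neg (by simp)]
      rw [h1, h2, pvFold_absorb_zero]
    · have h1 : pvRank pos (gs, ge, gn) = (1, if pos < gs then gs - pos else pos - ge, gn) := by
        simp [pvRank, hc]
      by_cases hlt : (if pos < gs then gs - pos else pos - ge) < d
      · have h2 : pvCombine (1, d, nm) ((1 : Int), if pos < gs then gs - pos else pos - ge, gn)
            = (1, if pos < gs then gs - pos else pos - ge, gn) := by
          unfold pvCombine; rw [if_neg (by simp; omega)]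
        simp only [pvLoopA, if_neg hc, if_pos hlt, List.foldl_cons, h1, h2]
        exact ih _ gn
      · have h2 : pvCombine (1, d, nm) ((1 : Int), if pos < gs then gs - pos else pos - ge, gn)
            = (1, d, nm) := by
          unfold pvCombine; rw [if_pos (by simp; omega)]
        simp only [pvLoopA, if_neg hc, if_neg hlt, List.foldl_cons, h1, h2]
        exact ih d nm

-- A's loop from the empty state equals B's reference fold's name
lemma pvLoopA_eq_spec (pos : Int) (g : Int × Int × String) (t : List (Int × Int × String)) :
    pvLoopA pos (g :: t) none none = some (pvSpecFold pos g t).2.2 := by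
  obtain ⟨gs, ge, gn⟩ := g
  by_cases hc : gs ≤ pos ∧ pos ≤ ge
  · have h1 : pvRank pos (gs, ge, gn) = (0, 0, gn) := by simp [pvRank, hc]
    simp only [pvLoopA, if_pos hc, pvSpecFold, h1, pvFold_absorb_zero]
  · have h1 : pvRank pos (gs, ge, gn) = (1, if pos < gs then gs - pos else pos - ge, gn) := by
      simp [pvRank, hc]
    simp only [pvLoopA, if_neg hc, pvSpecFold, h1]
    exact pvLoopA_eq_fold pos t _ gn

-- ===== VERDICT (by name: the statement is the Claim_ definition above) =====
theorem nearest_gene_for_chr_pos_py_spec : Claim_equal_nearest_gene_for_chr_pos_py := by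
  intro chrom pos genes_by_chr _
  unfold Spec_nearest_gene_for_chr_pos_py
  simp only [nearest_gene_for_chr_pos_py, nearest_gene_for_chr_pos_py_alt]
  cases h : (PySem.Dict.mk genes_by_chr).getD chrom [] with
  | nil => simp
  | cons g t =>
    simp only [if_neg (List.cons_ne_nil g t)]
    rw [pvBest_eq_spec pos (g :: t).length g t le_rfl]
    exact pvLoopA_eq_spec pos g t
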